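-- pv_equiv track=rewrite | github.com/martamakes/c-formatter-42-ext | wrapper/norminette_formatter.py | fix_tabs_spaces
-- ===== SOURCE A (Python) =====
-- def fix_tabs_spaces(content: str) -> str:
--     """Fix tabs and spaces according to norminette"""
--     lines = content.split('\n')
--     fixed_lines = []
--
--     for line in lines:
--         # Replace leading spaces with tabs for indentation
--         leading_space_count = len(line) - len(line.lstrip(' '))
--         if leading_space_count > 0:
--             tab_count = leading_space_count // 4  # Assuming 4 spaces per tab
--             remaining_spaces = 0  # No remaining spaces per norminette
--             fixed_line = '\t' * tab_count + ' ' * remaining_spaces + line.lstrip(' ')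
--             fixed_lines.append(fixed_line)
--         else:
--             fixed_lines.append(line)
--
--     return '\n'.join(fixed_lines)
-- ===== SOURCE B (Python) =====
-- def fix_tabs_spaces(content: str) -> str:
--     """Fix tabs and spaces according to norminette (single index-driven pass, no split/join of lines)."""
--     out = []
--     n = len(content)
--     k = 0
--     while True:
--         i = k
--         while i < n and content[i] == ' ':
--             i += 1
--         out.append('\t' * ((i - k) // 4))
--         j = i
--         while j < n and content[j] != '\n':
--             j += 1
--         out.append(content[i:j])
--         if j == n:
--             break
--         out.append('\n')
--         k = j + 1
--     return ''.join(out)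
-- ===== Notes on version B (the rewrite author's own statement) =====
-- stated objective: alternative
-- what changed: Replaces A's split-into-a-line-list / per-line fix loop / join with a single left-to-right state-machine pass over the characters that scans each line's leading-space run and copies the rest of the line, emitting tabs as it goes.
import Mathlib
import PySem

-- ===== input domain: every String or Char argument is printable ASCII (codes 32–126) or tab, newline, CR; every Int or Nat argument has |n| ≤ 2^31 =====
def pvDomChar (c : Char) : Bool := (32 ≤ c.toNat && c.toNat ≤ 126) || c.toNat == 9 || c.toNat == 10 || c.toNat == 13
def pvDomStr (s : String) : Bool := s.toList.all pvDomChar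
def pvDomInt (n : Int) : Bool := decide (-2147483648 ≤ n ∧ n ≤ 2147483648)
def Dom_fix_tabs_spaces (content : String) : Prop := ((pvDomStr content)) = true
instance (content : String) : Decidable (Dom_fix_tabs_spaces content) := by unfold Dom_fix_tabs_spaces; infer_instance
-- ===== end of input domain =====

-- B replaces A's split/loop/join over a line list by one state-machine pass over the characters; alternative decomposition, same cost.

-- ===== PORT A =====
-- line.lstrip(' ') drops exactly the leading spaces: dropWhile (· == ' ') (exact on this domain)
def fixLineA (line : List Char) : List Char :=
  let stripped := line.dropWhile (· == ' ')
  let leading_space_count := line.length - stripped.length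
  if leading_space_count > 0 then
    List.replicate (leading_space_count / 4) '\t' ++ List.replicate 0 ' ' ++ stripped
  else
    line

def fix_tabs_spaces (content : String) : String :=
  let lines := PySem.Chars.splitOn content.toList ['\n']
  let fixed_lines := lines.foldl (fun acc line => acc ++ [fixLineA line]) []
  String.mk (PySem.Chars.join ['\n'] fixed_lines)

-- ===== PORT B =====
-- Source B's inner index scans ('advance i while rest[i]==' '', 'advance j while rest[j]!='\n'')
-- are takeWhile/dropWhile of the same predicates; rest[j]=='\n' at the non-break exit.
def altGo (cs : List Char) : List Char :=
  match h : (cs.dropWhile (· == ' ')).dropWhile (· != '\n') with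
  | [] =>
      List.replicate ((cs.takeWhile (· == ' ')).length / 4) '\t'
        ++ (cs.dropWhile (· == ' ')).takeWhile (· != '\n')
  | _ :: tl =>
      List.replicate ((cs.takeWhile (· == ' ')).length / 4) '\t'
        ++ (cs.dropWhile (· == ' ')).takeWhile (· != '\n') ++ '\n' :: altGo tl
termination_by cs.length
decreasing_by
  have h1 : (cs.dropWhile (· == ' ')).length ≤ cs.length := cs.length_dropWhile_le _
  have h2 : ((cs.dropWhile (· == ' ')).dropWhile (· != '\n')).length ≤ (cs.dropWhile (· == ' ')).length :=
    (cs.dropWhile (· == ' ')).length_dropWhile_le _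
  rw [h] at h2
  simp at h2
  omega

def fix_tabs_spaces_alt (content : String) : String :=
  String.mk (altGo content.toList)

-- ===== PRECONDITION & SPEC =====
def Spec_fix_tabs_spaces (content : String) (out : String) : Prop := out = fix_tabs_spaces_alt content
instance (content : String) (out : String) : Decidable (Spec_fix_tabs_spaces content out) := by unfold Spec_fix_tabs_spaces; infer_instance

-- ===== CLAIM (what is proved, stated in full; the proofs are below) =====
def Claim_equal_fix_tabs_spaces : Prop := ∀ (content : String), Dom_fix_tabs_spaces content → Spec_fix_tabs_spaces content (fix_tabs_spaces content)

-- ===== LEMMAS AND PROOFS =====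

-- reference splitter used to characterise both A's split and B's traversal
def splitNL (cs : List Char) : List (List Char) :=
  match h : cs.dropWhile (· != '\n') with
  | [] => [cs]
  | _ :: tl => cs.takeWhile (· != '\n') :: splitNL tl
termination_by cs.length
decreasing_by
  have h2 : (cs.dropWhile (· != '\n')).length ≤ cs.length := cs.length_dropWhile_le _
  rw [h] at h2; simp at h2; omega

theorem splitNL_newline (rest : List Char) : splitNL ('\n' :: rest) = [] :: splitNL rest := by
  rw [splitNL]
  split
  · next h => simp [List.dropWhile_cons] at h
  · next x tl h =>
    simp only [List.dropWhile_cons] at h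
    simp only [bne_self_eq_false, if_neg, Bool.false_eq_true, not_false_eq_true, reduceIte] at h
    obtain ⟨rfl, rfl⟩ : '\n' = x ∧ rest = tl := by
      exact ⟨by injection h, by injection h⟩
    simp [List.takeWhile_cons]

theorem splitNL_cons_of_ne (c : Char) (rest : List Char) (hc : (c != '\n') = true) :
    splitNL (c :: rest) = (splitNL rest).modifyHead (c :: ·) := by
  conv_lhs => rw [splitNL]
  split
  · next h =>
    simp only [List.dropWhile_cons, hc, if_true] at h
    conv_rhs => rw [splitNL]
    split
    · next h2 => simp
    · next x tl h2 => rw [h] at h2; cases h2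
  · next x tl h =>
    simp only [List.dropWhile_cons, hc, if_true] at h
    conv_rhs => rw [splitNL]
    split
    · next h2 => rw [h] at h2; cases h2
    · next x' tl' h2 =>
      rw [h] at h2
      obtain ⟨rfl, rfl⟩ : x = x' ∧ tl = tl' := ⟨by injection h2, by injection h2⟩
      simp [List.takeWhile_cons, hc]

theorem go_eq (fuel : Nat) : ∀ (l cur : List Char) (acc : List (List Char)), l.length ≤ fuel →
    PySem.Chars.splitOn.go ['\n'] fuel l cur acc
      = acc.reverse ++ ((splitNL l).modifyHead (cur.reverse ++ ·)) := by
  induction fuel with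
  | zero =>
    intro l cur acc hl
    have : l = [] := List.eq_nil_of_length_eq_zero (Nat.le_zero.mp hl)
    subst this
    rw [splitNL]
    simp [PySem.Chars.splitOn.go]
  | succ f ih =>
    intro l cur acc hl
    cases l with
    | nil =>
      rw [splitNL]
      simp [PySem.Chars.splitOn.go]
    | cons c rest =>
      have hlen : rest.length ≤ f := by simpa using hl
      rw [PySem.Chars.splitOn.go]
      by_cases hc : c = '\n'
      · subst hc
        have hpre : List.isPrefixOf ['\n'] ('\n' :: rest) = true := by
          simp [List.isPrefixOf]
        rw [if_pos hpre]
        have hdrop : List.drop (List.length ['\n']) ('\n' :: rest) = rest := by simp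
        rw [hdrop, ih rest [] _ hlen, splitNL_newline]
        cases splitNL rest <;> simp
      · have hpre : List.isPrefixOf ['\n'] (c :: rest) = false := by
          simp [List.isPrefixOf]
          exact fun h => absurd h.symm hc
        rw [if_neg (by simp [hpre])]
        rw [ih rest (c :: cur) acc hlen]
        rw [splitNL_cons_of_ne c rest (by simp [hc])]
        cases hs : splitNL rest with
        | nil => simp
        | cons a tl => simp

theorem splitOn_eq_splitNL (cs : List Char) : PySem.Chars.splitOn cs ['\n'] = splitNL cs := by
  rw [PySem.Chars.splitOn]
  rw [go_eq _ _ _ _ (Nat.le_succ _)]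
  cases splitNL cs <;> simp

theorem dw_split (cs : List Char) :
    cs.dropWhile (· != '\n') = (cs.dropWhile (· == ' ')).dropWhile (· != '\n') := by
  induction cs with
  | nil => simp
  | cons c rest ih =>
    by_cases hc : c = ' '
    · subst hc
      simp [List.dropWhile_cons, ih]
    · simp [List.dropWhile_cons, hc]

theorem tw_split (cs : List Char) :
    cs.takeWhile (· != '\n')
      = cs.takeWhile (· == ' ') ++ (cs.dropWhile (· == ' ')).takeWhile (· != '\n') := by
  induction cs with
  | nil => simp
  | cons c rest ih =>
    by_cases hc : c = ' '
    · subst hc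
      simp [List.takeWhile_cons, List.dropWhile_cons, ih]
    · simp [List.takeWhile_cons, List.dropWhile_cons, hc]

theorem spline_take_drop (cs : List Char) :
    ((cs.takeWhile (· == ' ') ++ (cs.dropWhile (· == ' ')).takeWhile (· != '\n')).takeWhile (· == ' ')
        = cs.takeWhile (· == ' '))
    ∧ ((cs.takeWhile (· == ' ') ++ (cs.dropWhile (· == ' ')).takeWhile (· != '\n')).dropWhile (· == ' ')
        = (cs.dropWhile (· == ' ')).takeWhile (· != '\n')) := by
  induction cs with
  | nil => simp
  | cons c rest ih =>
    by_cases hc : c = ' '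
    · subst hc
      simp [List.takeWhile_cons, List.dropWhile_cons, ih]
    · by_cases hn : c = '\n'
      · subst hn
        simp [List.takeWhile_cons, List.dropWhile_cons, hc]
      · simp [List.takeWhile_cons, List.dropWhile_cons, hc, hn]

theorem fixLineA_eq (l : List Char) :
    fixLineA l
      = List.replicate ((l.takeWhile (· == ' ')).length / 4) '\t' ++ l.dropWhile (· == ' ') := by
  unfold fixLineA
  have hlen : l.length = (l.takeWhile (· == ' ')).length + (l.dropWhile (· == ' ')).length := by
    conv_lhs => rw [← List.takeWhile_append_dropWhile (p := (· == ' ')) (l := l)]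
    rw [List.length_append]
  by_cases hp : l.length - (l.dropWhile (· == ' ')).length > 0
  · rw [if_pos hp]
    have : l.length - (l.dropWhile (· == ' ')).length = (l.takeWhile (· == ' ')).length := by omega
    rw [this]
    simp
  · rw [if_neg hp]
    have h0 : (l.takeWhile (· == ' ')).length = 0 := by omega
    have := List.eq_nil_of_length_eq_zero h0
    rw [h0]
    conv_lhs => rw [← List.takeWhile_append_dropWhile (p := (· == ' ')) (l := l)]
    rw [this]
    simp

theorem fixLineA_take (cs : List Char) :
    fixLineA (cs.takeWhile (· != '\n'))
      = List.replicate ((cs.takeWhile (· == ' ')).length / 4) '\t'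
        ++ (cs.dropWhile (· == ' ')).takeWhile (· != '\n') := by
  rw [tw_split cs, fixLineA_eq, (spline_take_drop cs).1, (spline_take_drop cs).2]

theorem splitNL_of_nil {cs : List Char} (h : cs.dropWhile (· != '\n') = []) :
    splitNL cs = [cs] := by
  rw [splitNL]
  split
  · rfl
  · next x tl h2 => rw [h] at h2; cases h2

theorem splitNL_of_cons {cs x : List Char} {t : Char} (h : cs.dropWhile (· != '\n') = t :: x) :
    splitNL cs = cs.takeWhile (· != '\n') :: splitNL x := by
  rw [splitNL]
  split
  · next h2 => rw [h] at h2; cases h2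
  · next x' tl' h2 =>
    rw [h] at h2
    obtain ⟨rfl, rfl⟩ : t = x' ∧ x = tl' := ⟨by injection h2, by injection h2⟩
    rfl

theorem altGo_of_nil {cs : List Char} (h : (cs.dropWhile (· == ' ')).dropWhile (· != '\n') = []) :
    altGo cs = List.replicate ((cs.takeWhile (· == ' ')).length / 4) '\t'
        ++ (cs.dropWhile (· == ' ')).takeWhile (· != '\n') := by
  rw [altGo]
  split
  · rfl
  · next x tl h2 => rw [h] at h2; cases h2

theorem altGo_of_cons {cs tl : List Char} {t : Char}
    (h : (cs.dropWhile (· == ' ')).dropWhile (· != '\n') = t :: tl) :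
    altGo cs = List.replicate ((cs.takeWhile (· == ' ')).length / 4) '\t'
        ++ (cs.dropWhile (· == ' ')).takeWhile (· != '\n') ++ '\n' :: altGo tl := by
  rw [altGo]
  split
  · next h2 => rw [h] at h2; cases h2
  · next x' tl' h2 =>
    rw [h] at h2
    obtain ⟨rfl, rfl⟩ : t = x' ∧ tl = tl' := ⟨by injection h2, by injection h2⟩
    rfl

theorem splitNL_ne_nil (cs : List Char) : ∃ a as, splitNL cs = a :: as := by
  rw [splitNL]
  split
  · exact ⟨_, _, rfl⟩
  · exact ⟨_, _, rfl⟩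

theorem main_aux (n : Nat) : ∀ (cs : List Char), cs.length ≤ n →
    PySem.Chars.join ['\n'] ((splitNL cs).map fixLineA) = altGo cs := by
  induction n with
  | zero =>
    intro cs hlen
    have : cs = [] := List.eq_nil_of_length_eq_zero (Nat.le_zero.mp hlen)
    subst this
    rw [splitNL_of_nil rfl, altGo_of_nil rfl]
    simp [PySem.Chars.join_singleton, fixLineA_eq]
  | succ n ih =>
    intro cs hlen
    cases h : (cs.dropWhile (· == ' ')).dropWhile (· != '\n') with
    | nil =>
      have h' : cs.dropWhile (· != '\n') = [] := by rw [dw_split]; exact h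
      rw [splitNL_of_nil h', altGo_of_nil h]
      simp only [List.map_cons, List.map_nil, PySem.Chars.join_singleton]
      rw [fixLineA_eq]
      congr 1
      conv_lhs => rw [← List.takeWhile_append_dropWhile (p := (· != '\n')) (l := cs.dropWhile (· == ' '))]
      rw [h]
      simp
    | cons x tl =>
      have h' : cs.dropWhile (· != '\n') = x :: tl := by rw [dw_split]; exact h
      have htl : tl.length ≤ n := by
        have h1 : (cs.dropWhile (· != '\n')).length ≤ cs.length := cs.length_dropWhile_le _
        rw [h'] at h1
        simp at h1
        omega
      rw [splitNL_of_cons h', altGo_of_cons h]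
      obtain ⟨a, as, hs⟩ := splitNL_ne_nil tl
      rw [hs]
      simp only [List.map_cons]
      rw [PySem.Chars.join_cons_cons, ← List.map_cons, ← hs, ih tl htl, fixLineA_take]
      simp [List.append_assoc]

theorem foldl_push (l : List (List Char)) : ∀ (acc : List (List Char)),
    l.foldl (fun acc line => acc ++ [fixLineA line]) acc = acc ++ l.map fixLineA := by
  induction l with
  | nil => intro acc; simp
  | cons x xs ih => intro acc; simp [List.foldl_cons, ih]

-- ===== VERDICT (by name: the statement is the Claim_ definition above) =====
theorem fix_tabs_spaces_spec : Claim_equal_fix_tabs_spaces := by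
  intro content _
  unfold Spec_fix_tabs_spaces fix_tabs_spaces fix_tabs_spaces_alt
  simp only [foldl_push, List.nil_append, splitOn_eq_splitNL]
  rw [main_aux content.toList.length content.toList le_rfl]
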